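-- pv_equiv track=rewrite | github.com/ananya123-gif/Python_code- | PrepInsta_100_Code/Important Codes related to Arrays/10) Longest Palindrome in an Array.py | longest_palin
-- ===== SOURCE A (Python) =====
-- def longest_palin(arr):
--     l=[]
--     m=0
--     for i in arr:
--         p=str(i)
--         if(m<len(p) and p[::-1]==str(i)):
--             m=len(p)
--             l.append(p)
--     return int(l[-1])
-- ===== SOURCE B (Python) =====
-- def longest_palin(arr):
--     pals = [str(i) for i in arr if str(i)[::-1] == str(i)]
--     maxlen = max((len(p) for p in pals), default=0)
--     return int([p for p in pals if len(p) == maxlen][0])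
-- ===== Notes on version B (the rewrite author's own statement) =====
-- stated objective: alternative
-- what changed: Replaces the single-pass record-keeping loop (append each new strictly-longer palindrome, take the last) by a filter/max/first-match decomposition: collect all palindrome strings, compute the maximum length, return the first palindrome of that length.
import Mathlib
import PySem

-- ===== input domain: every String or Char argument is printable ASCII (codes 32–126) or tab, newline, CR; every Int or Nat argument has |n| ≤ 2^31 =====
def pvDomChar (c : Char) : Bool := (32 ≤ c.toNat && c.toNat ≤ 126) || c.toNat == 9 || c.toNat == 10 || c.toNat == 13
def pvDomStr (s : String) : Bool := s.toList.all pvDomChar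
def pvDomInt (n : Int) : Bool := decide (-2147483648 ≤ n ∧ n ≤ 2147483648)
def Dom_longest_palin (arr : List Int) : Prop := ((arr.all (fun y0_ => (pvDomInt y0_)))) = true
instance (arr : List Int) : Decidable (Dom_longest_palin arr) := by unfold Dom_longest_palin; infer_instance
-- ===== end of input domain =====

-- B replaces A's single-pass record-keeping loop (append each strictly-longer palindrome, take the
-- last) by a filter / max-length / first-match decomposition; equal cost, alternative structure.

-- ===== PORT A =====
-- A's loop body: p = str(i); if m < len(p) and p[::-1] == str(i): m = len(p); l.append(p)
def stepA (s : List String × Int) (i : Int) : List String × Int :=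
  let p := PySem.Int.toStr i
  if s.2 < PySem.Str.len p ∧ PySem.Str.slice? p none none (-1) = some (PySem.Int.toStr i)
  then (s.1 ++ [p], PySem.Str.len p) else s

def longest_palin (arr : List Int) : Int :=
  let st := arr.foldl stepA ([], 0)
  -- return int of the last recorded palindrome; Pre_ excludes the empty-record IndexError
  ((PySem.List.pyGet? st.1 (-1)).bind PySem.Int.ofStr?).getD 0

-- ===== PORT B =====
def longest_palin_alt (arr : List Int) : Int :=
  let pals := (arr.map PySem.Int.toStr).filter
    (fun p => PySem.Str.slice? p none none (-1) == some p)
  let maxlen := (pals.map PySem.Str.len).foldl max 0   -- max(..., default=0)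
  ((PySem.List.pyGet? (pals.filter (fun p => PySem.Str.len p == maxlen)) 0).bind PySem.Int.ofStr?).getD 0

-- ===== PRECONDITION & SPEC =====
-- Pre_ excludes exactly the inputs with no palindromic element, where Python A raises IndexError
-- indexing the empty record list (B raises IndexError there too).
def Pre_longest_palin (arr : List Int) : Prop :=
  (arr.any (fun i =>
    PySem.Str.slice? (PySem.Int.toStr i) none none (-1) == some (PySem.Int.toStr i))) = true
instance (arr : List Int) : Decidable (Pre_longest_palin arr) := by
  unfold Pre_longest_palin; infer_instance

def pvWitness_longest_palin : List Int := [121, 35]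

def Spec_longest_palin (arr : List Int) (out : Int) : Prop := out = longest_palin_alt arr
instance (arr : List Int) (out : Int) : Decidable (Spec_longest_palin arr out) := by
  unfold Spec_longest_palin; infer_instance

-- ===== CLAIM (what is proved, stated in full; the proofs are below) =====
def Claim_equal_longest_palin : Prop :=
  ∀ (arr : List Int), Dom_longest_palin arr → Pre_longest_palin arr →
    Spec_longest_palin arr (longest_palin arr)

-- ===== LEMMAS AND PROOFS =====

-- the palindrome strings of arr, in order (B's `pals`)
def palsOf (arr : List Int) : List String :=
  (arr.map PySem.Int.toStr).filter (fun p => PySem.Str.slice? p none none (-1) == some p)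

-- running maximum of the lengths, as A's m evolves
def maxLen (P : List String) (m : Int) : Int :=
  P.foldl (fun a p => max a (PySem.Str.len p)) m

lemma le_maxLen (P : List String) (m : Int) : m ≤ maxLen P m := by
  induction P generalizing m with
  | nil => simp [maxLen]
  | cons p t ih => exact le_trans (le_max_left m _) (ih _)

lemma palsOf_cons (i : Int) (t : List Int) :
    palsOf (i :: t) =
      if PySem.Str.slice? (PySem.Int.toStr i) none none (-1) == some (PySem.Int.toStr i)
      then PySem.Int.toStr i :: palsOf t else palsOf t := by
  simp [palsOf, List.filter_cons]

lemma head?_filter {α : Type} (q : α → Bool) (xs : List α) :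
    (xs.filter q).head? = xs.find? q := by
  induction xs with
  | nil => rfl
  | cons x t ih => by_cases h : q x <;> simp [h, ih]

-- main loop invariant for A
lemma loopA_getLast? (rest : List Int) (l : List String) (m : Int) :
    ((rest.foldl stepA (l, m)).1).getLast? =
      if m < maxLen (palsOf rest) m
      then (palsOf rest).find? (fun p => PySem.Str.len p == maxLen (palsOf rest) m)
      else l.getLast? := by
  induction rest generalizing l m with
  | nil => simp [palsOf, maxLen]
  | cons i t ih =>
    rw [List.foldl_cons]
    by_cases hpal : PySem.Str.slice? (PySem.Int.toStr i) none none (-1)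
        = some (PySem.Int.toStr i)
    · have hp : palsOf (i :: t) = PySem.Int.toStr i :: palsOf t := by
        rw [palsOf_cons, if_pos]
        rw [beq_iff_eq]; exact hpal
      by_cases hlt : m < PySem.Str.len (PySem.Int.toStr i)
      · have hstep : stepA (l, m) i
            = (l ++ [PySem.Int.toStr i], PySem.Str.len (PySem.Int.toStr i)) := by
          simp only [stepA]; rw [if_pos ⟨hlt, hpal⟩]
        rw [hstep, ih]
        have hM : maxLen (palsOf (i :: t)) m
            = maxLen (palsOf t) (PySem.Str.len (PySem.Int.toStr i)) := by
          rw [hp]; simp only [maxLen, List.foldl_cons]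
          rw [max_eq_right (le_of_lt hlt)]
        have hle := le_maxLen (palsOf t) (PySem.Str.len (PySem.Int.toStr i))
        rw [hM, hp]
        rcases lt_or_eq_of_le hle with hlt2 | heq
        · rw [if_pos hlt2, if_pos (lt_trans hlt hlt2),
            List.find?_cons_of_neg (by rw [beq_iff_eq]; exact ne_of_lt hlt2)]
        · rw [if_neg (by omega), if_pos (by omega),
            List.find?_cons_of_pos (by rw [beq_iff_eq]; exact heq)]
          simp
      · have hstep : stepA (l, m) i = (l, m) := by
          simp only [stepA]; rw [if_neg (fun h => hlt h.1)]
        rw [hstep, ih]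
        have hlen : PySem.Str.len (PySem.Int.toStr i) ≤ m := le_of_not_gt hlt
        have hM : maxLen (palsOf (i :: t)) m = maxLen (palsOf t) m := by
          rw [hp]; simp only [maxLen, List.foldl_cons]
          rw [max_eq_left hlen]
        rw [hM, hp]
        by_cases hm : m < maxLen (palsOf t) m
        · rw [if_pos hm, if_pos hm,
            List.find?_cons_of_neg (by rw [beq_iff_eq]; omega)]
        · rw [if_neg hm, if_neg hm]
    · have hstep : stepA (l, m) i = (l, m) := by
        simp only [stepA]; rw [if_neg (fun h => hpal h.2)]
      have hp : palsOf (i :: t) = palsOf t := by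
        rw [palsOf_cons, if_neg]
        rw [beq_iff_eq]; exact hpal
      rw [hstep, hp, ih]

lemma toStr_len_pos (i : Int) : 0 < PySem.Str.len (PySem.Int.toStr i) := by
  show (0 : Int) < ((PySem.Int.toStr i).toList.length : Int)
  rw [PySem.Int.toList_toStr]
  have : 0 < (PySem.Int.toChars i).length := by
    unfold PySem.Int.toChars; split
    · simp
    · exact Nat.length_toDigits_pos
  exact_mod_cast this

lemma len_le_maxLen (P : List String) (m : Int) (p : String) (hp : p ∈ P) :
    PySem.Str.len p ≤ maxLen P m := by
  induction P generalizing m with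
  | nil => cases hp
  | cons q t ih =>
    rcases List.mem_cons.mp hp with rfl | hp'
    · exact le_trans (le_max_right m _) (le_maxLen t _)
    · exact ih _ hp'

-- ===== VERDICT (by name: the statement is the Claim_ definition above) =====
theorem longest_palin_spec : Claim_equal_longest_palin := by
  intro arr _ hpre
  unfold Spec_longest_palin
  show longest_palin arr = longest_palin_alt arr
  obtain ⟨i, hi, hipal⟩ :
      ∃ i ∈ arr, (PySem.Str.slice? (PySem.Int.toStr i) none none (-1)
        == some (PySem.Int.toStr i)) = true := by
    simpa [Pre_longest_palin, List.any_eq_true] using hpre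
  have hmem : PySem.Int.toStr i ∈ palsOf arr :=
    List.mem_filter.mpr ⟨List.mem_map.mpr ⟨i, hi, rfl⟩, hipal⟩
  have hMpos : 0 < maxLen (palsOf arr) 0 :=
    lt_of_lt_of_le (toStr_len_pos i) (len_le_maxLen _ _ _ hmem)
  have hmax : ((palsOf arr).map PySem.Str.len).foldl max 0 = maxLen (palsOf arr) 0 := by
    rw [List.foldl_map]; rfl
  have hA := loopA_getLast? arr [] 0
  rw [if_pos hMpos] at hA
  simp only [longest_palin, longest_palin_alt]
  rw [PySem.List.pyGet?_neg_one, hA]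
  show _ = ((PySem.List.pyGet? ((palsOf arr).filter
      (fun p => PySem.Str.len p == ((palsOf arr).map PySem.Str.len).foldl max 0))
      0).bind PySem.Int.ofStr?).getD 0
  simp only [hmax]
  rw [PySem.List.pyGet?_zero, ← List.head?_eq_getElem?, head?_filter]
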